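-- pv_equiv track=rewrite | github.com/stefantaubert/text-utils | src/text_utils/text.py | strip_word
-- ===== SOURCE A (Python) =====
-- from typing import List, Optional, Tuple
--
-- def strip_word(word: List[str], symbols: List[str]) -> List[str]:
--   res = []
--   for i, char in enumerate(word):
--     if char in symbols:
--       continue
--     res = word[i:]
--     break
--
--   for i in range(len(res)):
--     char = res[-1 - i]
--     if char in symbols:
--       continue
--     res = res[:len(res) - i]
--     break
--   return res
-- ===== SOURCE B (Python) =====
-- def strip_word(word, symbols):
--   syms = set(symbols)
--   keep = [i for i, char in enumerate(word) if char not in syms]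
--   if not keep:
--     return []
--   return word[keep[0]:keep[-1] + 1]
-- ===== Notes on version B (the rewrite author's own statement) =====
-- stated objective: alternative
-- what changed: Replaces A's two end-scanning loops (forward scan + negative-index backward scan with slicing in each) by one pass that builds the index table of non-symbol positions and returns a single slice from its first to its last entry, with symbols held in a set.
import Mathlib
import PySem

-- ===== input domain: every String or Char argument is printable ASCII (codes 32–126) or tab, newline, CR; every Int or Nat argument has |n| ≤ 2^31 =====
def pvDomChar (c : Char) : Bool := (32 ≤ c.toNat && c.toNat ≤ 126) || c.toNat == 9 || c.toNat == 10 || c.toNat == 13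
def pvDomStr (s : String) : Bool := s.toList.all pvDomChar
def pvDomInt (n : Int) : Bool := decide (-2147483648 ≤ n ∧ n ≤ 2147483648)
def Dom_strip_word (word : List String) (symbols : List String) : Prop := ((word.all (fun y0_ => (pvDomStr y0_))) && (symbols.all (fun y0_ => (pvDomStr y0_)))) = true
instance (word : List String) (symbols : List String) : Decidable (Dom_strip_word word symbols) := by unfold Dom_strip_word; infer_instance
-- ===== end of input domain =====

-- B replaces A's two end-scanning loops by one pass that tabulates the indices of
-- non-symbol positions and takes a single slice from the first to the last index
-- (objective: alternative decomposition, same exact return value).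

-- ===== PORT A =====
-- first loop: 'for i, char in enumerate(word): if char in symbols: continue; res = word[i:]; break'
def stripLeadLoop (word symbols : List String) : List (Int × String) → List String
  | [] => []
  | (i, c) :: rest =>
    if symbols.contains c then stripLeadLoop word symbols rest
    else PySem.List.slice word (some i) none

-- second loop: 'for i in range(len(res)): char = res[-1-i]; if char in symbols: continue; res = res[:len(res)-i]; break'
def stripTrailLoop (symbols res : List String) : List Int → List String
  | [] => res
  | i :: rest =>
    if symbols.contains (PySem.List.pyGetD res (-1 - i) "") then stripTrailLoop symbols res rest
    else PySem.List.slice res none (some (PySem.List.len res - i))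

def strip_word (word : List String) (symbols : List String) : List String :=
  let res := stripLeadLoop word symbols (PySem.List.enumerate word)
  stripTrailLoop symbols res (PySem.List.pyRange 0 (PySem.List.len res))

-- ===== PORT B =====
def strip_word_alt (word : List String) (symbols : List String) : List String :=
  let syms := PySem.Set.ofList symbols
  let keep := ((PySem.List.enumerate word).filter (fun ic => !(PySem.Set.contains syms ic.2))).map Prod.fst
  if h : keep = [] then []
  else PySem.List.slice word (some (keep.head h)) (some (keep.getLast h + 1))

-- ===== PRECONDITION & SPEC =====
def Spec_strip_word (word : List String) (symbols : List String) (out : List String) : Prop := out = strip_word_alt word symbols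
instance (word : List String) (symbols : List String) (out : List String) : Decidable (Spec_strip_word word symbols out) := by unfold Spec_strip_word; infer_instance

-- ===== CLAIM (what is proved, stated in full; the proofs are below) =====
def Claim_equal_strip_word : Prop := ∀ (word : List String) (symbols : List String), Dom_strip_word word symbols → Spec_strip_word word symbols (strip_word word symbols)

-- ===== LEMMAS AND PROOFS =====

-- Python 'char in set(symbols)' coincides with 'char in symbols'
theorem pv_contains_ofList (symbols : List String) (c : String) :
    PySem.Set.contains (PySem.Set.ofList symbols) c = symbols.contains c := by
  by_cases hc : c ∈ symbols <;>
    simp [PySem.Set.contains, PySem.Set.mem_ofList, hc]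

-- A's first loop computes dropWhile (· ∈ symbols)
theorem pv_lead_spec (word symbols : List String) :
    ∀ (t : List String) (k : Nat), word.drop k = t →
      stripLeadLoop word symbols (PySem.List.enumerate t (k : Int)) =
        t.dropWhile (fun c => symbols.contains c) := by
  intro t
  induction t with
  | nil => intro k _; simp [PySem.List.enumerate_nil, stripLeadLoop]
  | cons c t ih =>
    intro k hk
    rw [PySem.List.enumerate_cons, List.dropWhile_cons]
    show (if symbols.contains c then
        stripLeadLoop word symbols (PySem.List.enumerate t ((k : Int) + 1))
      else PySem.List.slice word (some (k : Int)) none) = _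
    by_cases hc : symbols.contains c = true
    · rw [if_pos hc, if_pos hc]
      rw [show ((k : Int) + 1) = ((k + 1 : Nat) : Int) by push_cast; ring]
      exact ih (k + 1) (by rw [List.drop_add_one_eq_tail_drop, hk]; rfl)
    · rw [if_neg hc, if_neg hc, PySem.List.slice_from_natCast, hk]

-- A's second loop: scanning res[-1-i] from i = a onward strips the trailing
-- run of symbols (provided a non-symbol remains in the unscanned part)
theorem pv_trail_spec (symbols : List String) :
    ∀ (u : List String) (a : Nat) (res : List String), res.reverse.drop a = u →
      (∃ x ∈ u, symbols.contains x = false) →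
      stripTrailLoop symbols res (PySem.List.pyRange (a : Int) (PySem.List.len res)) =
        res.take (res.length - a - (u.takeWhile (fun c => symbols.contains c)).length) := by
  intro u
  induction u with
  | nil => intro a res _ hex; exact absurd hex (by simp)
  | cons c u ih =>
    intro a res hdrop hex
    have halt : a < res.length := by
      have h1 : (res.reverse.drop a).length = res.length - a := by simp
      rw [hdrop] at h1; simp at h1; omega
    have hrevA : res.reverse[a]? = some c := by
      have := List.getElem?_drop (xs := res.reverse) (i := a) (j := 0)
      rw [hdrop] at this; simpa using this.symm
    have hc_eq : PySem.List.pyGetD res (-1 - (a : Int)) "" = c := by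
      rw [show (-1 : Int) - (a : Int) = -((a + 1 : Nat) : Int) by push_cast; ring,
        PySem.List.pyGetD_neg_natCast res (a + 1) "" (by omega) (by omega)]
      have hidx : a < res.reverse.length := by simpa using halt
      have h2 := List.getElem_reverse (l := res) (i := a) (h := hidx)
      rw [List.getElem?_eq_some_iff] at hrevA
      rcases hrevA with ⟨_, h3⟩
      rw [h2] at h3
      convert h3 using 2
      omega
    rw [PySem.List.pyRange_one_cons
      (by rw [PySem.List.len_eq]; exact_mod_cast halt)]
    show (if symbols.contains (PySem.List.pyGetD res (-1 - (a : Int)) "") then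
        stripTrailLoop symbols res (PySem.List.pyRange ((a : Int) + 1) (PySem.List.len res))
      else PySem.List.slice res none (some (PySem.List.len res - (a : Int)))) = _
    rw [hc_eq, List.takeWhile_cons]
    by_cases hc : symbols.contains c = true
    · rw [if_pos hc, if_pos hc]
      have hdrop' : res.reverse.drop (a + 1) = u := by
        rw [List.drop_add_one_eq_tail_drop, hdrop]; rfl
      have hex' : ∃ x ∈ u, symbols.contains x = false := by
        rcases hex with ⟨x, hx, hpx⟩
        rcases List.mem_cons.mp hx with rfl | hx'
        · rw [hc] at hpx; cases hpx
        · exact ⟨x, hx', hpx⟩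
      rw [show ((a : Int) + 1) = ((a + 1 : Nat) : Int) by push_cast; ring]
      rw [ih (a + 1) res hdrop' hex']
      congr 1
      simp only [List.length_cons]
      omega
    · rw [if_neg hc, if_neg hc]
      rw [show PySem.List.len res - (a : Int) = ((res.length - a : Nat) : Int) by
        rw [PySem.List.len_eq]; omega]
      rw [show ((res.length - a : Nat) : Int) = (((res.length - a : Nat) : Int)) from rfl]
      rw [PySem.List.slice_to res (by positivity)]
      simp

-- index table of the non-symbol positions (proof-side name for B's 'keep')
def pvK (p : String → Bool) : List String → Int → List Int
  | [], _ => []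
  | c :: t, k => if p c then pvK p t (k + 1) else k :: pvK p t (k + 1)

theorem pv_keep_eq_pvK (p : String → Bool) :
    ∀ (t : List String) (k : Int),
      ((PySem.List.enumerate t k).filter (fun ic => !(p ic.2))).map Prod.fst = pvK p t k := by
  intro t
  induction t with
  | nil => intro k; simp [PySem.List.enumerate_nil, pvK]
  | cons c t ih =>
    intro k
    rw [PySem.List.enumerate_cons]
    by_cases hc : p c <;> simp [pvK, hc, ih (k + 1)]

theorem pvK_all (p : String → Bool) :
    ∀ (t : List String) (k : Int), (∀ x ∈ t, p x = true) → pvK p t k = [] := by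
  intro t
  induction t with
  | nil => intro _ _; rfl
  | cons c t ih =>
    intro k h
    simp [pvK, h c (by simp), ih (k + 1) (fun x hx => h x (by simp [hx]))]

theorem pvK_append (p : String → Bool) :
    ∀ (t u : List String) (k : Int), pvK p (t ++ u) k = pvK p t k ++ pvK p u (k + t.length) := by
  intro t
  induction t with
  | nil => intro u k; simp [pvK]
  | cons c t ih =>
    intro u k
    have harg : (k + 1) + (t.length : Int) = k + ((c :: t).length : Int) := by
      simp; ring
    show pvK p (c :: (t ++ u)) k = _
    by_cases hc : p c = true
    · show (if p c then pvK p (t ++ u) (k + 1) else k :: pvK p (t ++ u) (k + 1)) = _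
      rw [if_pos hc, ih u (k + 1), harg]
      show _ = (if p c then pvK p t (k + 1) else k :: pvK p t (k + 1)) ++ _
      rw [if_pos hc]
    · show (if p c then pvK p (t ++ u) (k + 1) else k :: pvK p (t ++ u) (k + 1)) = _
      rw [if_neg hc, ih u (k + 1), harg]
      show _ = (if p c then pvK p t (k + 1) else k :: pvK p t (k + 1)) ++ _
      rw [if_neg hc]
      rfl

-- B's guarded slice through head?/getLast?
theorem pv_dite_slice (word : List String) (keep : List Int) (k0 x : Int)
    (hh : keep.head? = some k0) (hl : keep.getLast? = some x) :
    (if h : keep = [] then ([] : List String)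
      else PySem.List.slice word (some (keep.head h)) (some (keep.getLast h + 1))) =
      PySem.List.slice word (some k0) (some (x + 1)) := by
  have hne : keep ≠ [] := by rintro rfl; simp at hh
  rw [dif_neg hne]
  have h1 : keep.head hne = k0 := by
    have := List.head?_eq_some_head (l := keep) hne
    rw [hh] at this; exact (Option.some.inj this).symm
  have h2 : keep.getLast hne = x := by
    have := List.getLast?_eq_some_getLast (l := keep) hne
    rw [hl] at this; exact (Option.some.inj this).symm
  rw [h1, h2]

-- ===== VERDICT (by name: the statement is the Claim_ definition above) =====
theorem strip_word_spec : Claim_equal_strip_word := by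
  intro word symbols _
  unfold Spec_strip_word
  set p : String → Bool := fun c => symbols.contains c with hp
  -- the keep expression of B, rewritten to pvK
  have hkeep : ((PySem.List.enumerate word).filter
        (fun ic => !(PySem.Set.contains (PySem.Set.ofList symbols) ic.2))).map Prod.fst =
      pvK p word 0 := by
    rw [← pv_keep_eq_pvK p word 0]
    congr 1
    apply List.filter_congr
    intro ic _
    rw [pv_contains_ofList]
  -- A's first loop
  have hlead : stripLeadLoop word symbols (PySem.List.enumerate word) = word.dropWhile p := by
    have := pv_lead_spec word symbols word 0 (by simp)
    rw [show ((0 : Nat) : Int) = 0 from rfl] at this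
    exact this
  have hBdef : strip_word_alt word symbols =
      (if h : ((PySem.List.enumerate word).filter
          (fun ic => !(PySem.Set.contains (PySem.Set.ofList symbols) ic.2))).map Prod.fst = [] then []
        else PySem.List.slice word
          (some ((((PySem.List.enumerate word).filter
            (fun ic => !(PySem.Set.contains (PySem.Set.ofList symbols) ic.2))).map Prod.fst).head h))
          (some ((((PySem.List.enumerate word).filter
            (fun ic => !(PySem.Set.contains (PySem.Set.ofList symbols) ic.2))).map Prod.fst).getLast h + 1))) := rfl
  have hAdef : strip_word word symbols =
      stripTrailLoop symbols (stripLeadLoop word symbols (PySem.List.enumerate word))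
        (PySem.List.pyRange 0 (PySem.List.len (stripLeadLoop word symbols (PySem.List.enumerate word)))) := rfl
  by_cases hall : ∀ x ∈ word, p x = true
  · -- every element is a symbol: both sides are []
    have hres_nil : word.dropWhile p = [] := List.dropWhile_eq_nil_iff.mpr (fun x hx => hall x hx)
    have hA : strip_word word symbols = [] := by
      rw [hAdef, hlead, hres_nil]
      rw [show PySem.List.len ([] : List String) = 0 from rfl,
        PySem.List.pyRange_one_eq_nil (by norm_num)]
      rfl
    have hB : strip_word_alt word symbols = [] := by
      rw [hBdef, dif_pos (by rw [hkeep]; exact pvK_all p word 0 hall)]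
    rw [hA, hB]
  · -- there is a non-symbol
    have hne' : word.dropWhile p ≠ [] := by
      rw [Ne, List.dropWhile_eq_nil_iff]
      intro hcon
      exact hall fun x hx => hcon x hx
    -- decompositions
    obtain ⟨T, hT⟩ : ∃ T, word.takeWhile p = T := ⟨_, rfl⟩
    obtain ⟨res, hres⟩ : ∃ r, word.dropWhile p = r := ⟨_, rfl⟩
    have hres_ne : res ≠ [] := hres ▸ hne'
    obtain ⟨Z, hZ⟩ : ∃ Z, res.reverse.takeWhile p = Z := ⟨_, rfl⟩
    obtain ⟨D, hD⟩ : ∃ D, res.reverse.dropWhile p = D := ⟨_, rfl⟩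
    -- the head of res is not a symbol
    have hhead0 : p ((word.dropWhile p).head hne') = false := List.head_dropWhile_not p hne'
    have hheadmem : (word.dropWhile p).head hne' ∈ res.reverse := by
      rw [List.mem_reverse, ← hres]
      exact List.head_mem hne'
    have hD_ne : D ≠ [] := by
      rw [← hD, Ne, List.dropWhile_eq_nil_iff]
      intro hcon
      have := hcon _ hheadmem
      rw [hhead0] at this; cases this
    obtain ⟨M, hM⟩ : ∃ M, D.reverse = M := ⟨_, rfl⟩
    have hM_ne : M ≠ [] := by rw [← hM]; simpa using hD_ne
    have hresMZ : res = M ++ Z.reverse := by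
      have h1 : res.reverse = Z ++ D := by rw [← hZ, ← hD, List.takeWhile_append_dropWhile]
      calc res = res.reverse.reverse := by simp
        _ = (Z ++ D).reverse := by rw [h1]
        _ = M ++ Z.reverse := by rw [List.reverse_append, hM]
    have hword : word = T ++ M ++ Z.reverse := by
      rw [List.append_assoc, ← hresMZ, ← hT, ← hres, List.takeWhile_append_dropWhile]
    have hZall : ∀ x ∈ Z.reverse, p x = true := by
      intro x hx
      exact List.mem_takeWhile_imp (l := res.reverse) (hZ ▸ (List.mem_reverse.mp hx))
    have hTall : ∀ x ∈ T, p x = true := fun x hx => List.mem_takeWhile_imp (hT ▸ hx)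
    -- split M at both ends
    obtain ⟨c, M', hMc⟩ : ∃ c M', M = c :: M' := by
      cases M with
      | nil => exact absurd rfl hM_ne
      | cons c M' => exact ⟨c, M', rfl⟩
    have hpc : p c = false := by
      have hh : (word.dropWhile p).head? = some c := by
        rw [hres, hresMZ, hMc]; rfl
      have := List.head?_eq_some_head (l := word.dropWhile p) hne'
      rw [hh] at this
      rw [Option.some.inj this]
      exact hhead0
    rcases List.eq_nil_or_concat M with hnil | ⟨M'', d, hMd⟩
    · exact absurd hnil hM_ne
    have hMd' : M = M'' ++ [d] := by simpa [List.concat_eq_append] using hMd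
    have hDd : D = d :: M''.reverse := by
      calc D = D.reverse.reverse := by simp
        _ = M.reverse := by rw [hM]
        _ = d :: M''.reverse := by rw [hMd']; simp
    have hpd : p d = false := by
      have hD_ne0 : res.reverse.dropWhile p ≠ [] := by rw [hD]; exact hD_ne
      have hh : (res.reverse.dropWhile p).head? = some d := by rw [hD, hDd]; rfl
      have h0 := List.head_dropWhile_not p hD_ne0
      have := List.head?_eq_some_head (l := res.reverse.dropWhile p) hD_ne0
      rw [hh] at this
      rw [Option.some.inj this]
      exact h0
    -- A's value is M
    have hA : strip_word word symbols = M := by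
      rw [hAdef, hlead, hres]
      have hex : ∃ x ∈ res.reverse, p x = false := by
        refine ⟨c, ?_, hpc⟩
        rw [List.mem_reverse, hresMZ, hMc]
        simp
      have := pv_trail_spec symbols res.reverse 0 res (by simp) hex
      rw [show ((0 : Nat) : Int) = 0 from rfl] at this
      rw [this, hZ, hresMZ]
      have hlen : (M ++ Z.reverse).length - 0 - Z.length = M.length := by simp
      rw [hlen]
      exact List.take_left' rfl
    -- B's keep list is pvK p M (T.length)
    have hkeepM : pvK p word 0 = pvK p M ((T.length : Int)) := by
      rw [hword, pvK_append, pvK_append, pvK_all p T 0 hTall,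
        pvK_all p Z.reverse _ hZall]
      simp
    have hkeep_head : pvK p M ((T.length : Int)) =
        (T.length : Int) :: pvK p M' ((T.length : Int) + 1) := by
      rw [hMc]
      show (if p c then _ else _) = _
      rw [if_neg (by rw [hpc]; exact Bool.false_ne_true)]
    have hkeep_last : pvK p M ((T.length : Int)) =
        pvK p M'' ((T.length : Int)) ++ [(T.length : Int) + M''.length] := by
      rw [hMd', pvK_append]
      congr 1
      show (if p d then _ else _) = _
      rw [if_neg (by rw [hpd]; exact Bool.false_ne_true)]
      rfl
    -- B's value is M
    have hB : strip_word_alt word symbols = M := by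
      rw [hBdef]
      rw [pv_dite_slice word _ ((T.length : Int)) ((T.length : Int) + M''.length)
        (by rw [hkeep, hkeepM, hkeep_head]; rfl)
        (by rw [hkeep, hkeepM, hkeep_last]; simp)]
      rw [show (T.length : Int) + (M''.length : Int) + 1 =
        ((T.length + M''.length + 1 : Nat) : Int) by push_cast; ring]
      rw [PySem.List.slice_natCast]
      rw [show T.length + M''.length + 1 - T.length = M.length by rw [hMd']; simp; omega]
      have hdrop : word.drop T.length = M ++ Z.reverse := by
        rw [hword, List.append_assoc]
        exact List.drop_left
      rw [hdrop]
      exact List.take_left' rfl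
    rw [hA, hB]
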